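-- pv_equiv track=rewrite | github.com/Jdatle/EvilGeniusDataScienceProject | johnMadeFunctions.py | KeepColumn
-- ===== SOURCE A (Python) =====
-- def KeepColumn(columnsList, list):
--     newList = []
--     for i in range(0,len(list),1):
--         newLine = []
--         for j in range(0,len(list[i]),1):
--             if j in columnsList:
--                 newLine.append(list[i][j])
--             else:
--                 pass
--         newList.append(newLine)
--     return newList
-- ===== SOURCE B (Python) =====
-- def KeepColumn(columnsList, list):
--     cols = sorted(set(columnsList))
--     return [[row[j] for j in cols if 0 <= j < len(row)] for row in list]
-- ===== Notes on version B (the rewrite author's own statement) =====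
-- stated objective: faster
-- what changed: Precomputes the ordered de-duplicated column-index table once with sorted(set(columnsList)) and indexes each row directly at those positions (with a range guard), instead of scanning every element of every row and membership-testing its index against columnsList.
import Mathlib
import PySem

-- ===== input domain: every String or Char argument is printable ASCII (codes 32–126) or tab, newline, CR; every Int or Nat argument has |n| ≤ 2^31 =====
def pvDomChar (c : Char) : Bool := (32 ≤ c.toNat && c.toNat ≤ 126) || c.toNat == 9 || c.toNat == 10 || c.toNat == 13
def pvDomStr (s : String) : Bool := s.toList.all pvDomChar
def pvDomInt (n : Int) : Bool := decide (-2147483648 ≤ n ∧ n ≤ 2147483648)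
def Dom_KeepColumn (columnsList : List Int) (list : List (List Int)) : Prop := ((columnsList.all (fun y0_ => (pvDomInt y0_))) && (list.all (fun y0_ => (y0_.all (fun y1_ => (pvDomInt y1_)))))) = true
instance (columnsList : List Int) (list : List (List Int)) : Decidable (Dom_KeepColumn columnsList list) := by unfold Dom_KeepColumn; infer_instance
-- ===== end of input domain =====

-- B precomputes sorted(set(columnsList)) once and indexes each row directly at those positions (faster in a timing run).

-- ===== PORT A =====
def KeepColumn (columnsList : List Int) (list : List (List Int)) : List (List Int) :=
  (PySem.List.pyRange 0 (list.length : Int) 1).foldl (fun newList i =>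
    let row := PySem.List.pyGetD list i []   -- i always in range here
    newList ++ [(PySem.List.pyRange 0 (row.length : Int) 1).foldl (fun newLine j =>
      if columnsList.contains j then newLine ++ [PySem.List.pyGetD row j 0] else newLine) []]) []

-- ===== PORT B =====
-- the comprehension's guard 0 <= j < len(row) is the filter; row[j] is pyGetD (in range by the guard)
def KeepColumn_alt (columnsList : List Int) (list : List (List Int)) : List (List Int) :=
  let cols := PySem.List.sorted (PySem.Set.ofList columnsList) (fun x => x) false
  list.map (fun row =>
    (cols.filter (fun j => decide (0 ≤ j ∧ j < (row.length : Int)))).map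
      (fun j => PySem.List.pyGetD row j 0))

-- ===== PRECONDITION & SPEC =====
def Spec_KeepColumn (columnsList : List Int) (list : List (List Int)) (out : List (List Int)) : Prop := out = KeepColumn_alt columnsList list
instance (columnsList : List Int) (list : List (List Int)) (out : List (List Int)) : Decidable (Spec_KeepColumn columnsList list out) := by unfold Spec_KeepColumn; infer_instance

-- ===== CLAIM (what is proved, stated in full; the proofs are below) =====
def Claim_equal_KeepColumn : Prop := ∀ (columnsList : List Int) (list : List (List Int)), Dom_KeepColumn columnsList list → Spec_KeepColumn columnsList list (KeepColumn columnsList list)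

-- ===== LEMMAS AND PROOFS =====

-- the kept index lists coincide: indices 0..n-1 that lie in columnsList = sorted distinct columns that lie in [0,n)
lemma kept_indices_eq (columnsList : List Int) (n : Nat) :
    (PySem.List.pyRange 0 (n : Int) 1).filter (fun j => columnsList.contains j)
      = (PySem.List.sorted (PySem.Set.ofList columnsList) (fun x => x) false).filter
          (fun j => decide (0 ≤ j ∧ j < (n : Int))) := by
  have h1 : ((PySem.List.pyRange 0 (n : Int) 1).filter (fun j => columnsList.contains j)).Pairwise (· < ·) :=
    (PySem.List.pairwise_lt_pyRange_one 0 (n : Int)).filter _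
  have h2 : ((PySem.List.sorted (PySem.Set.ofList columnsList) (fun x => x) false).filter
      (fun j => decide (0 ≤ j ∧ j < (n : Int)))).Pairwise (· < ·) :=
    (PySem.List.sorted_ofList_pairwise_lt columnsList).filter _
  have hperm : ((PySem.List.pyRange 0 (n : Int) 1).filter (fun j => columnsList.contains j)).Perm
      ((PySem.List.sorted (PySem.Set.ofList columnsList) (fun x => x) false).filter
        (fun j => decide (0 ≤ j ∧ j < (n : Int)))) := by
    rw [List.perm_ext_iff_of_nodup (h1.imp ne_of_lt) (h2.imp ne_of_lt)]
    intro a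
    simp [List.mem_filter, PySem.List.mem_pyRange_one, PySem.List.mem_sorted,
      PySem.Set.mem_ofList]
    tauto
  exact hperm.eq_of_pairwise (fun a b _ _ hab hba => absurd (lt_trans hab hba) (lt_irrefl a)) h1 h2

lemma inner_eq (columnsList : List Int) (row : List Int) :
    (PySem.List.pyRange 0 (row.length : Int) 1).foldl (fun newLine j =>
        if columnsList.contains j then newLine ++ [PySem.List.pyGetD row j 0] else newLine) []
      = ((PySem.List.sorted (PySem.Set.ofList columnsList) (fun x => x) false).filter
          (fun j => decide (0 ≤ j ∧ j < (row.length : Int)))).map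
          (fun j => PySem.List.pyGetD row j 0) := by
  rw [PySem.List.foldl_append_if]
  rw [kept_indices_eq columnsList row.length]
  simp

-- ===== VERDICT (by name: the statement is the Claim_ definition above) =====
theorem KeepColumn_spec : Claim_equal_KeepColumn := by
  intro columnsList list _
  show KeepColumn columnsList list = KeepColumn_alt columnsList list
  unfold KeepColumn KeepColumn_alt
  rw [PySem.List.foldl_append_singleton_eq_map]
  have : (PySem.List.pyRange 0 (list.length : Int) 1).map
      (fun i => PySem.List.pyGetD list i []) = list := by
    exact PySem.List.map_pyGetD_pyRange_zero list []
  calc (PySem.List.pyRange 0 (list.length : Int) 1).map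
        (fun i => (PySem.List.pyRange 0 ((PySem.List.pyGetD list i []).length : Int) 1).foldl
          (fun newLine j => if columnsList.contains j then newLine ++ [PySem.List.pyGetD (PySem.List.pyGetD list i []) j 0] else newLine) [])
      = ((PySem.List.pyRange 0 (list.length : Int) 1).map (fun i => PySem.List.pyGetD list i [])).map
          (fun row => (PySem.List.pyRange 0 (row.length : Int) 1).foldl
            (fun newLine j => if columnsList.contains j then newLine ++ [PySem.List.pyGetD row j 0] else newLine) []) := by
        rw [List.map_map]; rfl
    _ = _ := by rw [this]; exact List.map_congr_left (fun row _ => inner_eq columnsList row)
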